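-- pv_equiv track=rewrite | github.com/aitrail001/words-v2 | tools/lexicon/voice_import_db.py | summarize_voice_manifest_rows
-- ===== SOURCE A (Python) =====
-- from typing import Any, Callable, Iterable
--
-- def summarize_voice_manifest_rows(rows: Iterable[dict[str, Any]]) -> dict[str, int]:
--     summary = {
--         "row_count": 0,
--         "generated_count": 0,
--         "existing_count": 0,
--         "failed_count": 0,
--     }
--     for row in rows:
--         summary["row_count"] += 1
--         status = str(row.get("status") or "").strip().lower()
--         if status == "generated":
--             summary["generated_count"] += 1
--         elif status == "existing":
--             summary["existing_count"] += 1
--         elif status == "failed":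
--             summary["failed_count"] += 1
--     return summary
-- ===== SOURCE B (Python) =====
-- def summarize_voice_manifest_rows(rows):
--     statuses = [str(row.get("status") or "").strip().lower() for row in rows]
--     return {
--         "row_count": len(statuses),
--         "generated_count": statuses.count("generated"),
--         "existing_count": statuses.count("existing"),
--         "failed_count": statuses.count("failed"),
--     }
-- ===== Notes on version B (the rewrite author's own statement) =====
-- stated objective: idiomatic
-- what changed: B normalizes all statuses into a list in one comprehension and builds the summary dict directly from len() and list.count() lookups, eliminating the mutable counter dict and the if/elif branch chain.
import Mathlib
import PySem

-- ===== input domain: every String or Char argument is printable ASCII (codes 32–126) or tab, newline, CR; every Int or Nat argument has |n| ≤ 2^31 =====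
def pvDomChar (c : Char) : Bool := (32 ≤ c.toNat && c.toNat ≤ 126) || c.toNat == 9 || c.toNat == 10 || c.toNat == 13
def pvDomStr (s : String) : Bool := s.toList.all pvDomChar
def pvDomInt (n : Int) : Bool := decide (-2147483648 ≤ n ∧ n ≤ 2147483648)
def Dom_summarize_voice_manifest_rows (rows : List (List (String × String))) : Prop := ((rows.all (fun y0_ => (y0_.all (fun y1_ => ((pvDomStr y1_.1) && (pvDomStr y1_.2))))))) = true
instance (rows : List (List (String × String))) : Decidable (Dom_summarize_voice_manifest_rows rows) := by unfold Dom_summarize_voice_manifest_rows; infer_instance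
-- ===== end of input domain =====

-- B builds the list of normalized statuses once and derives the summary from len() and list.count() lookups (no mutable counters, no if/elif chain); same O(n) cost.


-- ===== PORT A =====
-- status = str(row.get("status") or "").strip().lower()  (values are strings, so 'or ""' replaces "" / missing by "")
def pvNormStatus (row : List (String × String)) : String :=
  match (PySem.Dict.mk row).get? "status" with
  | none => PySem.Str.lower (PySem.Str.strip "")
  | some s => PySem.Str.lower (PySem.Str.strip (if s = "" then "" else s))

def summarize_voice_manifest_rows (rows : List (List (String × String))) : List (String × Int) :=
  let summary : PySem.Dict String Int :=
    PySem.Dict.mk [("row_count", 0), ("generated_count", 0), ("existing_count", 0), ("failed_count", 0)]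
  let final := rows.foldl (fun summary row =>
    let summary := summary.modify "row_count" 0 (· + 1)
    let status := pvNormStatus row
    if status = "generated" then summary.modify "generated_count" 0 (· + 1)
    else if status = "existing" then summary.modify "existing_count" 0 (· + 1)
    else if status = "failed" then summary.modify "failed_count" 0 (· + 1)
    else summary) summary
  final.items

-- ===== PORT B =====
def summarize_voice_manifest_rows_alt (rows : List (List (String × String))) : List (String × Int) :=
  let statuses := rows.map pvNormStatus
  [("row_count", (statuses.length : Int)),
   ("generated_count", (statuses.count "generated" : Int)),
   ("existing_count", (statuses.count "existing" : Int)),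
   ("failed_count", (statuses.count "failed" : Int))]

-- ===== PRECONDITION & SPEC =====
def Spec_summarize_voice_manifest_rows (rows : List (List (String × String))) (out : List (String × Int)) : Prop := out = summarize_voice_manifest_rows_alt rows
instance (rows : List (List (String × String))) (out : List (String × Int)) : Decidable (Spec_summarize_voice_manifest_rows rows out) := by unfold Spec_summarize_voice_manifest_rows; infer_instance

-- ===== CLAIM (what is proved, stated in full; the proofs are below) =====
def Claim_equal_summarize_voice_manifest_rows : Prop := ∀ (rows : List (List (String × String))), Dom_summarize_voice_manifest_rows rows → Spec_summarize_voice_manifest_rows rows (summarize_voice_manifest_rows rows)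

-- ===== LEMMAS AND PROOFS =====
def pvMk4 (a g e f : Int) : PySem.Dict String Int :=
  PySem.Dict.mk [("row_count", a), ("generated_count", g), ("existing_count", e), ("failed_count", f)]

lemma pv_mod_row (a g e f : Int) :
    (pvMk4 a g e f).modify "row_count" 0 (· + 1) = pvMk4 (a + 1) g e f := by
  simp [pvMk4, PySem.Dict.modify, PySem.Dict.contains, PySem.Dict.getD, PySem.Dict.get?,
    PySem.Dict.insert]

lemma pv_mod_gen (a g e f : Int) :
    (pvMk4 a g e f).modify "generated_count" 0 (· + 1) = pvMk4 a (g + 1) e f := by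
  simp [pvMk4, PySem.Dict.modify, PySem.Dict.contains, PySem.Dict.getD, PySem.Dict.get?,
    PySem.Dict.insert]

lemma pv_mod_exi (a g e f : Int) :
    (pvMk4 a g e f).modify "existing_count" 0 (· + 1) = pvMk4 a g (e + 1) f := by
  simp [pvMk4, PySem.Dict.modify, PySem.Dict.contains, PySem.Dict.getD, PySem.Dict.get?,
    PySem.Dict.insert]

lemma pv_mod_fai (a g e f : Int) :
    (pvMk4 a g e f).modify "failed_count" 0 (· + 1) = pvMk4 a g e (f + 1) := by
  simp [pvMk4, PySem.Dict.modify, PySem.Dict.contains, PySem.Dict.getD, PySem.Dict.get?,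
    PySem.Dict.insert]

lemma pv_loop_items (rows : List (List (String × String))) :
    ∀ (a g e f : Int),
    (rows.foldl (fun summary row =>
      let summary := summary.modify "row_count" 0 (· + 1)
      let status := pvNormStatus row
      if status = "generated" then summary.modify "generated_count" 0 (· + 1)
      else if status = "existing" then summary.modify "existing_count" 0 (· + 1)
      else if status = "failed" then summary.modify "failed_count" 0 (· + 1)
      else summary)
      (pvMk4 a g e f)).items
    = [("row_count", a + rows.length),
       ("generated_count", g + ((rows.map pvNormStatus).count "generated" : Int)),
       ("existing_count", e + ((rows.map pvNormStatus).count "existing" : Int)),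
       ("failed_count", f + ((rows.map pvNormStatus).count "failed" : Int))] := by
  induction rows with
  | nil => intro a g e f; simp [pvMk4]
  | cons r rs ih =>
    intro a g e f
    by_cases h1 : pvNormStatus r = "generated"
    · simp only [List.foldl_cons, h1, pv_mod_row, pv_mod_gen, String.reduceEq, reduceIte]
      rw [ih]
      simp [h1]
      omega
    · by_cases h2 : pvNormStatus r = "existing"
      · simp only [List.foldl_cons, h2, pv_mod_row, pv_mod_exi, String.reduceEq, reduceIte]
        rw [ih]
        simp [h2]
        omega
      · by_cases h3 : pvNormStatus r = "failed"
        · simp only [List.foldl_cons, pv_mod_row, pv_mod_fai, h3, String.reduceEq, reduceIte]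
          rw [ih]
          simp [h3]
          omega
        · simp only [List.foldl_cons, pv_mod_row, if_neg h1, if_neg h2, if_neg h3]
          rw [ih]
          simp [h1, h2, h3]
          omega

-- ===== VERDICT (by name: the statement is the Claim_ definition above) =====
theorem summarize_voice_manifest_rows_spec : Claim_equal_summarize_voice_manifest_rows := by
  intro rows _
  unfold Spec_summarize_voice_manifest_rows summarize_voice_manifest_rows summarize_voice_manifest_rows_alt
  simpa using pv_loop_items rows 0 0 0 0
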